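-- pv_equiv track=rewrite | github.com/chrisculver/PiRhoI2 | src/ops/op_basis_utils.py | cppMom
-- ===== SOURCE A (Python) =====
-- def cppMom(m,swapXZ=False):
--     tmp=m.replace('m','-')
--     for i in ['0','1','2','3','4','5','6','7','8','9']:
--         tmp=tmp.replace(i,i+' ')
--     dirs=tmp.split(' ')
--     if swapXZ:
--         tmp=dirs[2]+' '+dirs[1]+' '+dirs[0]
--     else:
--         tmp=dirs[0]+' '+dirs[1]+' '+dirs[2]
--     return tmp
-- ===== SOURCE B (Python) =====
-- def cppMom(m, swapXZ=False):
--     # One pass over the characters: cut a segment after every ASCII digit and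
--     # at every space, instead of ten .replace passes followed by a split.
--     dirs = []
--     buf = []
--     for c in m.replace('m', '-'):
--         if c in '0123456789':
--             buf.append(c)
--             dirs.append(''.join(buf))
--             buf = []
--         elif c == ' ':
--             dirs.append(''.join(buf))
--             buf = []
--         else:
--             buf.append(c)
--     dirs.append(''.join(buf))
--     if swapXZ:
--         return dirs[2] + ' ' + dirs[1] + ' ' + dirs[0]
--     else:
--         return dirs[0] + ' ' + dirs[1] + ' ' + dirs[2]
-- ===== Notes on version B (the rewrite author's own statement) =====
-- stated objective: alternative
-- what changed: Replaces the ten chained digit-by-digit .replace passes plus split(' ') with a single character pass that builds the segment list directly with a buffer; the swapXZ tail is unchanged.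
-- outside the precondition, e.g. on cppMom(' ', False): A raises IndexError, B raises IndexError
import Mathlib
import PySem

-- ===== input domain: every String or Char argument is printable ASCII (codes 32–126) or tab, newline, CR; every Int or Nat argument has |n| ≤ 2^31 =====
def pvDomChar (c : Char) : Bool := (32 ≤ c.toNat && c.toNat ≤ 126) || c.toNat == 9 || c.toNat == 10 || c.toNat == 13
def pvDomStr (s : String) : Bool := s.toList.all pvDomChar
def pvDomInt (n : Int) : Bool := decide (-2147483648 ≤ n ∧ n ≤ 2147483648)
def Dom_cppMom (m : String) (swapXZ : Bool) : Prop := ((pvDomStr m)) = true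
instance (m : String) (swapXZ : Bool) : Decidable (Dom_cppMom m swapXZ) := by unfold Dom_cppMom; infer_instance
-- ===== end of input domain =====

-- B builds the segment list in ONE character pass (buffer + cut after each digit / at each
-- space) instead of A's ten chained digit replaces followed by split(' '); same value proved.

-- ===== PORT A =====
def cppMom (m : String) (swapXZ : Bool) : String :=
  let tmp := PySem.Str.replace m "m" "-"
  let tmp := ["0","1","2","3","4","5","6","7","8","9"].foldl
      (fun t i => PySem.Str.replace t i (i ++ " ")) tmp
  let dirs := (PySem.Str.split? tmp " ").getD []   -- sep is nonempty, so split? is always some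
  if swapXZ then
    ((PySem.List.pyGet? dirs 2).getD "") ++ " " ++ ((PySem.List.pyGet? dirs 1).getD "")
      ++ " " ++ ((PySem.List.pyGet? dirs 0).getD "")
  else
    ((PySem.List.pyGet? dirs 0).getD "") ++ " " ++ ((PySem.List.pyGet? dirs 1).getD "")
      ++ " " ++ ((PySem.List.pyGet? dirs 2).getD "")

-- ===== PORT B =====
-- the loop body of Source B: state = (finished segments, current buffer)
def cppMomAltStep (p : List String × List Char) (c : Char) : List String × List Char :=
  if c ∈ "0123456789".toList then (p.1 ++ [String.ofList (p.2 ++ [c])], ([] : List Char))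
  else if c = ' ' then (p.1 ++ [String.ofList p.2], ([] : List Char))
  else (p.1, p.2 ++ [c])

def cppMom_alt (m : String) (swapXZ : Bool) : String :=
  let s := PySem.Str.replace m "m" "-"
  let st := s.toList.foldl cppMomAltStep ([], [])
  let dirs := st.1 ++ [String.ofList st.2]
  if swapXZ then
    ((PySem.List.pyGet? dirs 2).getD "") ++ " " ++ ((PySem.List.pyGet? dirs 1).getD "")
      ++ " " ++ ((PySem.List.pyGet? dirs 0).getD "")
  else
    ((PySem.List.pyGet? dirs 0).getD "") ++ " " ++ ((PySem.List.pyGet? dirs 1).getD "")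
      ++ " " ++ ((PySem.List.pyGet? dirs 2).getD "")

-- ===== PRECONDITION & SPEC =====
-- Pre_ excludes exactly the inputs with fewer than two digit-or-space characters;
-- there Python A raises IndexError when indexing the third split segment, and B raises too.
def Pre_cppMom (m : String) (swapXZ : Bool) : Prop :=
  2 ≤ m.toList.countP (fun c => c ∈ "0123456789 ".toList)
instance (m : String) (swapXZ : Bool) : Decidable (Pre_cppMom m swapXZ) := by
  unfold Pre_cppMom; infer_instance
def pvWitness_cppMom : String × Bool := ("m101", false)

def Spec_cppMom (m : String) (swapXZ : Bool) (out : String) : Prop := out = cppMom_alt m swapXZ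
instance (m : String) (swapXZ : Bool) (out : String) : Decidable (Spec_cppMom m swapXZ out) := by
  unfold Spec_cppMom; infer_instance

-- ===== CLAIM (what is proved, stated in full; the proofs are below) =====
def Claim_equal_cppMom : Prop := ∀ (m : String) (swapXZ : Bool), Dom_cppMom m swapXZ → Pre_cppMom m swapXZ → Spec_cppMom m swapXZ (cppMom m swapXZ)

-- ===== LEMMAS AND PROOFS =====

-- segments of a string split at ' '
def pvSegs : List Char → List (List Char)
  | [] => [[]]
  | c :: t =>
    if c = ' ' then [] :: pvSegs t
    else match pvSegs t with
      | [] => [[c]]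
      | h :: r => (c :: h) :: r

-- segments split at ' ' AND cut after every digit (what B computes)
def pvSegsD : List Char → List (List Char)
  | [] => [[]]
  | c :: t =>
    if c ∈ "0123456789".toList then [c] :: pvSegsD t
    else if c = ' ' then [] :: pvSegsD t
    else match pvSegsD t with
      | [] => [[c]]
      | h :: r => (c :: h) :: r

theorem pvSegs_ne_nil (l : List Char) : pvSegs l ≠ [] := by
  cases l with
  | nil => simp [pvSegs]
  | cons c t =>
    simp only [pvSegs]
    split_ifs with h
    · simp
    · cases hs : pvSegs t <;> simp

theorem pvSegsD_ne_nil (l : List Char) : pvSegsD l ≠ [] := by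
  cases l with
  | nil => simp [pvSegsD]
  | cons c t =>
    simp only [pvSegsD]
    split_ifs with h h'
    · simp
    · simp
    · cases hs : pvSegsD t <;> simp

theorem pv_cons_headI_tail {α : Type} [Inhabited α] (l : List α) (h : l ≠ []) :
    l.headI :: l.tail = l := by
  cases l with
  | nil => exact absurd rfl h
  | cons a t => rfl

-- single-character replace is a flatMap
theorem pv_replace_go (a : Char) (new : List Char) :
    ∀ (fuel : Nat) (l acc : List Char), l.length ≤ fuel →
      PySem.Chars.replace.go [a] new fuel l acc
        = acc.reverse ++ l.flatMap (fun c => if c = a then new else [c]) := by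
  intro fuel
  induction fuel with
  | zero =>
    intro l acc h
    have : l = [] := List.length_eq_zero_iff.mp (Nat.le_zero.mp h)
    subst this
    rw [PySem.Chars.replace.go.eq_def]; simp
  | succ n ih =>
    intro l acc h
    cases l with
    | nil => rw [PySem.Chars.replace.go.eq_def]; simp
    | cons c t =>
      rw [PySem.Chars.replace.go.eq_def]
      simp only [List.isPrefixOf]
      by_cases hc : c = a
      · subst hc
        rw [if_pos (by simp)]
        simp only [List.length_cons, List.length_nil, List.drop_succ_cons, List.drop_zero]
        rw [ih t (new.reverse ++ acc) (by simpa using Nat.le_of_succ_le_succ h)]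
        simp [List.flatMap_cons]
      · rw [if_neg (by simp [beq_iff_eq]; exact fun h' => hc h'.symm),
          ih t (c :: acc) (by simpa using Nat.le_of_succ_le_succ h)]
        simp [List.flatMap_cons, hc]

theorem pv_replace_single (l : List Char) (a : Char) (new : List Char) :
    PySem.Chars.replace l [a] new = l.flatMap (fun c => if c = a then new else [c]) := by
  unfold PySem.Chars.replace
  rw [if_neg (by simp)]
  simpa using pv_replace_go a new l.length l [] le_rfl

-- splitOn at a single space computes pvSegs
theorem pv_split_go :
    ∀ (fuel : Nat) (l cur : List Char) (acc : List (List Char)), l.length ≤ fuel →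
      PySem.Chars.splitOn.go [' '] fuel l cur acc
        = acc.reverse ++ ((cur.reverse ++ (pvSegs l).headI) :: (pvSegs l).tail) := by
  intro fuel
  induction fuel with
  | zero =>
    intro l cur acc h
    have : l = [] := List.length_eq_zero_iff.mp (Nat.le_zero.mp h)
    subst this
    rw [PySem.Chars.splitOn.go.eq_def]; simp [pvSegs]
  | succ n ih =>
    intro l cur acc h
    cases l with
    | nil => rw [PySem.Chars.splitOn.go.eq_def]; simp [pvSegs]
    | cons c t =>
      rw [PySem.Chars.splitOn.go.eq_def]
      simp only [List.isPrefixOf]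
      by_cases hc : c = ' '
      · subst hc
        rw [if_pos (by simp)]
        simp only [List.length_cons, List.length_nil, List.drop_succ_cons, List.drop_zero]
        rw [ih t [] (cur.reverse :: acc) (by simpa using Nat.le_of_succ_le_succ h)]
        have hne := pvSegs_ne_nil t
        simp [pvSegs, pv_cons_headI_tail _ hne]
      · rw [if_neg (by simp [beq_iff_eq]; exact fun h' => hc h'.symm),
          ih t (c :: cur) acc (by simpa using Nat.le_of_succ_le_succ h)]
        have hne := pvSegs_ne_nil t
        rcases hs : pvSegs t with _ | ⟨hd, tl⟩
        · exact absurd hs hne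
        · simp [pvSegs, hc, hs]

theorem pv_splitOn_space (s : List Char) : PySem.Chars.splitOn s [' '] = pvSegs s := by
  unfold PySem.Chars.splitOn
  rw [pv_split_go (s.length + 1) s [] [] (by omega)]
  simpa using pv_cons_headI_tail (pvSegs s) (pvSegs_ne_nil s)

-- the fold of the ten digit replaces is one flatMap
theorem pv_replace_fold (ds : List Char) (l : List Char)
    (hsp : ' ' ∉ ds) (hnd : ds.Nodup) :
    ds.foldl (fun t d => t.flatMap (fun c => if c = d then [d, ' '] else [c])) l
      = l.flatMap (fun c => if c ∈ ds then [c, ' '] else [c]) := by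
  induction ds generalizing l with
  | nil => simp
  | cons d ds ih =>
    have hsp' : ' ' ∉ ds := fun h => hsp (List.mem_cons_of_mem _ h)
    have hd' : d ∉ ds := (List.nodup_cons.mp hnd).1
    have hnd' : ds.Nodup := (List.nodup_cons.mp hnd).2
    have hdsp : d ≠ ' ' := fun h => hsp (h ▸ List.mem_cons_self)
    simp only [List.foldl_cons]
    rw [ih _ hsp' hnd', List.flatMap_assoc]
    congr 1
    funext c
    by_cases hc : c = d
    · subst hc
      simp [hd', hsp']
    · simp [hc]

-- unfolding lemmas for the segment functions
theorem pvSegs_space (t : List Char) : pvSegs (' ' :: t) = [] :: pvSegs t := by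
  rw [pvSegs, if_pos rfl]

theorem pvSegs_other (c : Char) (t : List Char) (h : c ≠ ' ') :
    pvSegs (c :: t) = (c :: (pvSegs t).headI) :: (pvSegs t).tail := by
  rw [pvSegs, if_neg h]
  rcases ht : pvSegs t with _ | ⟨hd, tl⟩
  · exact absurd ht (pvSegs_ne_nil t)
  · rfl

theorem pvSegsD_digit (c : Char) (t : List Char) (h : c ∈ "0123456789".toList) :
    pvSegsD (c :: t) = [c] :: pvSegsD t := by
  rw [pvSegsD, if_pos h]

theorem pvSegsD_space (t : List Char) : pvSegsD (' ' :: t) = [] :: pvSegsD t := by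
  rw [pvSegsD, if_neg (by decide), if_pos rfl]

theorem pvSegsD_other (c : Char) (t : List Char) (h1 : c ∉ "0123456789".toList) (h2 : c ≠ ' ') :
    pvSegsD (c :: t) = (c :: (pvSegsD t).headI) :: (pvSegsD t).tail := by
  rw [pvSegsD, if_neg h1, if_neg h2]
  rcases ht : pvSegsD t with _ | ⟨hd, tl⟩
  · exact absurd ht (pvSegsD_ne_nil t)
  · rfl

-- pvSegs after digit expansion = pvSegsD
theorem pv_segs_expand (l : List Char) :
    pvSegs (l.flatMap (fun c => if c ∈ "0123456789".toList then [c, ' '] else [c])) = pvSegsD l := by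
  induction l with
  | nil => simp [pvSegs, pvSegsD]
  | cons c t ih =>
    by_cases hd : c ∈ "0123456789".toList
    · have hcs : c ≠ ' ' := by intro h; subst h; revert hd; decide
      rw [List.flatMap_cons, if_pos hd, List.cons_append, List.cons_append, List.nil_append,
        pvSegs_other c _ hcs, pvSegs_space, pvSegsD_digit c t hd]
      rw [List.headI_cons, List.tail_cons, ih]
    · by_cases hs : c = ' '
      · subst hs
        rw [List.flatMap_cons, if_neg hd, List.singleton_append, pvSegs_space, pvSegsD_space, ih]
      · rw [List.flatMap_cons, if_neg hd, List.singleton_append, pvSegs_other c _ hs,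
          pvSegsD_other c t hd hs, ih]

-- B's loop computes pvSegsD
theorem pv_bloop (l : List Char) :
    ∀ (ds : List String) (buf : List Char),
      (let r := l.foldl cppMomAltStep (ds, buf); r.1 ++ [String.ofList r.2])
        = ds ++ ((buf ++ (pvSegsD l).headI) :: (pvSegsD l).tail).map String.ofList := by
  induction l with
  | nil => intro ds buf; simp [pvSegsD]
  | cons c t ih =>
    intro ds buf
    simp only [List.foldl_cons]
    by_cases hd : c ∈ "0123456789".toList
    · rw [show cppMomAltStep (ds, buf) c = (ds ++ [String.ofList (buf ++ [c])], ([] : List Char))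
        from by rw [cppMomAltStep, if_pos hd]]
      rw [ih, pvSegsD_digit c t hd]
      simp [pv_cons_headI_tail _ (pvSegsD_ne_nil t)]
    · by_cases hs : c = ' '
      · subst hs
        rw [show cppMomAltStep (ds, buf) ' ' = (ds ++ [String.ofList buf], ([] : List Char))
          from by rw [cppMomAltStep, if_neg hd, if_pos rfl]]
        rw [ih, pvSegsD_space]
        simp [pv_cons_headI_tail _ (pvSegsD_ne_nil t)]
      · rw [show cppMomAltStep (ds, buf) c = (ds, buf ++ [c])
          from by rw [cppMomAltStep, if_neg hd, if_neg hs]]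
        rw [ih, pvSegsD_other c t hd hs]
        simp

-- A's ten string replaces, at the character level
theorem pv_tmp_toList (s : String) :
    ((["0","1","2","3","4","5","6","7","8","9"].foldl
        (fun t i => PySem.Str.replace t i (i ++ " ")) s)).toList
      = s.toList.flatMap (fun c => if c ∈ "0123456789".toList then [c, ' '] else [c]) := by
  have h := pv_replace_fold "0123456789".toList s.toList (by decide) (by decide)
  simp only [show "0123456789".toList = ['0','1','2','3','4','5','6','7','8','9'] from rfl,
    List.foldl_cons, List.foldl_nil] at h ⊢
  rw [← h]
  simp [PySem.Str.replace, pv_replace_single]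

-- both ports produce the same dirs list
theorem pv_dirs_eq (m : String) :
    ((PySem.Str.split? (["0","1","2","3","4","5","6","7","8","9"].foldl
        (fun t i => PySem.Str.replace t i (i ++ " ")) (PySem.Str.replace m "m" "-")) " ").getD [])
      = (let st := (PySem.Str.replace m "m" "-").toList.foldl cppMomAltStep ([], []);
          st.1 ++ [String.ofList st.2]) := by
  rw [PySem.Str.split?]
  rw [show (PySem.Chars.split? _ (" ").toList) =
      some (PySem.Chars.splitOn ((["0","1","2","3","4","5","6","7","8","9"].foldl
        (fun t i => PySem.Str.replace t i (i ++ " ")) (PySem.Str.replace m "m" "-"))).toList [' '])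
    from by rw [PySem.Chars.split?]; rfl]
  rw [pv_splitOn_space, pv_tmp_toList, pv_segs_expand]
  rw [pv_bloop _ [] []]
  rcases hs : pvSegsD (PySem.Str.replace m "m" "-").toList with _ | ⟨hd, tl⟩
  · exact absurd hs (pvSegsD_ne_nil _)
  · simp [Option.getD]

-- ===== VERDICT (by name: the statement is the Claim_ definition above) =====
theorem cppMom_spec : Claim_equal_cppMom := by
  intro m swapXZ _ _
  unfold Spec_cppMom cppMom cppMom_alt
  simp only [pv_dirs_eq m]
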